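-- pv_equiv track=rewrite | github.com/jdoeun/Algorithm-Study | iceprins/240912/PSG_N으로_표현.py | solution
-- ===== SOURCE A (Python) =====
-- def solution(N, number):
--     if N == number:
--         return 1
--
--     dp = [set() for _ in range(9)]
--     dp[1].add(N)
--
--     for i in range(2, 9):
--         for j in range(1, i):
--             first = dp[j]
--             second = dp[i - j]
--             for x in first:
--                 for y in second:
--                     dp[i].add(int(str(N) * i))
--                     dp[i].add(x + y)
--                     dp[i].add(x - y)
--                     dp[i].add(x * y)
--                     if y != 0:
--                         dp[i].add(x // y)
--
--         if number in dp[i]: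
--             return i
--
--     return -1
-- ===== SOURCE B (Python) =====
-- def solution(N, number):
--     if N == number:
--         return 1
--
--     memo = {1: {N}}
--
--     def reachable(k):
--         if k in memo:
--             return memo[k]
--         vals = {int(str(N) * k)}
--         for j in range(1, k):
--             for x in reachable(j):
--                 for y in reachable(k - j):
--                     vals.add(x + y)
--                     vals.add(x - y)
--                     vals.add(x * y)
--                     if y != 0:
--                         vals.add(x // y)
--         memo[k] = vals
--         return vals
--
--     for k in range(2, 9):
--         if number in reachable(k):
--             return k
--     return -1
-- ===== Notes on version B (the rewrite author's own statement) =====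
-- stated objective: alternative
-- what changed: Replaces the bottom-up dp-array with nine mutable sets by a memoized top-down recursion reachable(k) that builds the set of values expressible with exactly k copies of N, seeding each level once with the repunit instead of re-adding int(str(N)*i) in every innermost iteration.
import Mathlib
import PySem

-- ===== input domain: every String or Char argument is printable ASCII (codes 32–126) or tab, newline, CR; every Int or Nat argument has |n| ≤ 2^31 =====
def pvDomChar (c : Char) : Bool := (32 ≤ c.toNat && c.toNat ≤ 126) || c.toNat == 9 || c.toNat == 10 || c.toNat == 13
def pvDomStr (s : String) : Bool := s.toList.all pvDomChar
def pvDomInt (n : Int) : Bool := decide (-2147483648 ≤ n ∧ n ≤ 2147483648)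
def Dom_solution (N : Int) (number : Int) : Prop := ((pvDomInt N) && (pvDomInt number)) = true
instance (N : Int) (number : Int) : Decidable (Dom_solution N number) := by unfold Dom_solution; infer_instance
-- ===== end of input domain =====

-- B replaces A's bottom-up dp array of nine sets by a memoized top-down recursion reachable(k)
-- seeding each level once with the repunit; equivalence is about the return value only.
--
-- Python 'set's are ported as a pair (insertion list, Std.HashSet index): the list holds the
-- distinct elements (what the loops iterate), the hash index answers membership in O(1) as
-- CPython's hash set does (a PySem.Set's linear scan would make evaluating the ~50k set
-- operations of one call infeasible in the interpreter).  Both ports use the same pair ops;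
-- the proofs use only that index and list agree on membership (SInv below), which is all the
-- returned Int depends on — iteration order over a Python set is unspecified and never observed.
abbrev PvSet := List Int × Std.HashSet Int
def pvSNew : PvSet := ([], ∅)
def pvSAdd (s : PvSet) (x : Int) : PvSet :=
  if s.2.contains x then s else (x :: s.1, s.2.insert x)
def pvSIn (x : Int) (s : PvSet) : Bool := s.2.contains x

-- int(str(N) * i); for N < 0 (reachable only when N ≠ number) Python raises ValueError —
-- excluded by Pre_solution, so the `.getD 0` totalisation is never reached on admitted inputs
def pvRepunit (N : Int) (i : Nat) : Int :=
  (PySem.Int.ofChars? (List.flatten (List.replicate i (PySem.Int.toChars N)))).getD 0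

-- ===== PORT A =====
-- the innermost loop body: dp[i].add(int(str(N)*i)); .add(x+y); .add(x-y); .add(x*y); if y != 0: .add(x//y)
def pvABody (N : Int) (i : Int) (di : PvSet) (x y : Int) : PvSet :=
  let di := pvSAdd di (pvRepunit N i.toNat)
  let di := pvSAdd di (x + y)
  let di := pvSAdd di (x - y)
  let di := pvSAdd di (x * y)
  if y = 0 then di else pvSAdd di (PySem.Int.floordiv x y)

-- for x in first: for y in second: …
def pvAInner (N : Int) (i : Int) (first second : PvSet) (di : PvSet) : PvSet :=
  first.1.foldl (fun di x => second.1.foldl (fun di y => pvABody N i di x y) di) di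

-- one iteration of the j-loop (dp[i] is mutated in place in Python: read, extend, write back)
def pvAStepJ (N : Int) (i : Int) (dp : List PvSet) (j : Int) : List PvSet :=
  let first := PySem.List.pyGetD dp j pvSNew
  let second := PySem.List.pyGetD dp (i - j) pvSNew
  PySem.List.pySetD dp i (pvAInner N i first second (PySem.List.pyGetD dp i pvSNew))

-- the i-loop with its early return
def pvALoop (N number : Int) (dp : List PvSet) : List Int → Int
  | [] => -1
  | i :: rest =>
    let dp' := (PySem.List.pyRange 1 i 1).foldl (pvAStepJ N i) dp
    if pvSIn number (PySem.List.pyGetD dp' i pvSNew) then i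
    else pvALoop N number dp' rest

def solution (N : Int) (number : Int) : Int :=
  if N = number then 1
  else
    let dp : List PvSet := (PySem.List.pyRange 0 9 1).map (fun _ => pvSNew)
    let dp := PySem.List.pySetD dp 1 (pvSAdd (PySem.List.pyGetD dp 1 pvSNew) N)
    pvALoop N number dp (PySem.List.pyRange 2 9 1)

-- ===== PORT B =====
-- vals.add(x+y); vals.add(x-y); vals.add(x*y); if y != 0: vals.add(x//y)
def pvBOps (vals : PvSet) (x y : Int) : PvSet :=
  let vals := pvSAdd vals (x + y)
  let vals := pvSAdd vals (x - y)
  let vals := pvSAdd vals (x * y)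
  if y = 0 then vals else pvSAdd vals (PySem.Int.floordiv x y)

-- reachable(k) with its memo dict threaded through explicitly (Source B mutates a closure dict);
-- 'if k in memo: return memo[k]', else build vals from {int(str(N)*k)} and the j-split loops,
-- store it and return it.  The memoized calls reachable(j) / reachable(k-j) of the for-headers
-- are hoisted to per-j bindings (the memo makes repeated calls return the same set).
def pvReach (N : Int) (k : Nat) (memo : PySem.Dict Int PvSet) :
    PvSet × PySem.Dict Int PvSet :=
  match memo.get? (k : Int) with
  | some s => (s, memo)
  | none =>
    let st :=
      (PySem.List.pyRange 1 (k : Int) 1).attach.foldl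
        (fun st j =>
          let fr := pvReach N j.1.toNat st.2
          let se := pvReach N (k - j.1.toNat) fr.2
          ((fr.1.1.foldl (fun vals x =>
              se.1.1.foldl (fun vals y => pvBOps vals x y) vals) st.1, se.2) :
            PvSet × PySem.Dict Int PvSet))
        ((pvSAdd pvSNew (pvRepunit N k), memo) : PvSet × PySem.Dict Int PvSet)
    (st.1, st.2.insert (k : Int) st.1)
  termination_by k
  decreasing_by
  · have h := PySem.List.mem_pyRange_one.mp j.2; omega
  · have h := PySem.List.mem_pyRange_one.mp j.2; omega

def pvBLoop (N number : Int) : PySem.Dict Int PvSet → List Int → Int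
  | _, [] => -1
  | memo, k :: rest =>
    let r := pvReach N k.toNat memo
    if pvSIn number r.1 then k else pvBLoop N number r.2 rest

def solution_alt (N : Int) (number : Int) : Int :=
  if N = number then 1
  else
    pvBLoop N number (PySem.Dict.ofList [((1 : Int), pvSAdd pvSNew N)])
      (PySem.List.pyRange 2 9 1)

-- ===== PRECONDITION & SPEC =====
-- Pre_ excludes N < 0 with N ≠ number: there both programs raise ValueError at int(str(N)*k)
-- (e.g. int('-3-3')); A returns on every admitted input.
def Pre_solution (N : Int) (number : Int) : Prop := 0 ≤ N ∨ N = number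
instance (N : Int) (number : Int) : Decidable (Pre_solution N number) := by unfold Pre_solution; infer_instance
def pvWitness_solution : Int × Int := (5, 12)

def Spec_solution (N : Int) (number : Int) (out : Int) : Prop := out = solution_alt N number
instance (N : Int) (number : Int) (out : Int) : Decidable (Spec_solution N number out) := by unfold Spec_solution; infer_instance

-- ===== CLAIM (what is proved, stated in full; the proofs are below) =====
def Claim_equal_solution : Prop := ∀ (N : Int) (number : Int), Dom_solution N number → Pre_solution N number → Spec_solution N number (solution N number)

-- ===== LEMMAS AND PROOFS =====

-- the hash index and the element list agree on membership
def SInv (s : PvSet) : Prop := ∀ x : Int, s.2.contains x = true ↔ x ∈ s.1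

theorem sinv_pvSNew : SInv pvSNew := by
  intro x; simp [pvSNew]

theorem pvSAdd_props (s : PvSet) (x : Int) (h : SInv s) :
    SInv (pvSAdd s x) ∧ ∀ v, v ∈ (pvSAdd s x).1 ↔ v ∈ s.1 ∨ v = x := by
  unfold pvSAdd
  by_cases hc : s.2.contains x = true
  · rw [if_pos hc]
    exact ⟨h, fun v => by
      constructor
      · exact Or.inl
      · rintro (hv | rfl)
        · exact hv
        · exact (h v).mp hc⟩
  · rw [if_neg hc]
    constructor
    · intro v
      simp only [Std.HashSet.contains_insert, List.mem_cons]
      constructor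
      · intro hv
        rcases Bool.or_eq_true_iff.mp hv with hv | hv
        · exact Or.inl (eq_of_beq hv).symm
        · exact Or.inr ((h v).mp hv)
      · rintro (rfl | hv)
        · simp
        · exact Bool.or_eq_true_iff.mpr (Or.inr ((h v).mpr hv))
    · intro v
      simp only [List.mem_cons]
      tauto

-- the four values an (x, y) pair can contribute
def pvOpsP (x y v : Int) : Prop :=
  v = x + y ∨ v = x - y ∨ v = x * y ∨ (y ≠ 0 ∧ v = PySem.Int.floordiv x y)

theorem pvBOps_props (s : PvSet) (x y : Int) (h : SInv s) :
    SInv (pvBOps s x y) ∧ ∀ v, v ∈ (pvBOps s x y).1 ↔ v ∈ s.1 ∨ pvOpsP x y v := by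
  obtain ⟨h1, m1⟩ := pvSAdd_props s (x + y) h
  obtain ⟨h2, m2⟩ := pvSAdd_props _ (x - y) h1
  obtain ⟨h3, m3⟩ := pvSAdd_props _ (x * y) h2
  simp only [pvBOps]
  by_cases hy : y = 0
  · rw [if_pos hy]
    refine ⟨h3, fun v => ?_⟩
    rw [m3, m2, m1]
    unfold pvOpsP
    constructor
    · rintro (((hv | rfl) | rfl) | rfl) <;> tauto
    · rintro (hv | (rfl | rfl | rfl | ⟨hny, rfl⟩)) <;> tauto
  · obtain ⟨h4, m4⟩ := pvSAdd_props _ (PySem.Int.floordiv x y) h3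
    rw [if_neg hy]
    refine ⟨h4, fun v => ?_⟩
    rw [m4, m3, m2, m1]
    unfold pvOpsP
    constructor
    · rintro ((((hv | rfl) | rfl) | rfl) | rfl) <;> tauto
    · rintro (hv | (rfl | rfl | rfl | ⟨hny, rfl⟩)) <;> tauto

theorem pvABody_props (N : Int) (i : Int) (s : PvSet) (x y : Int) (h : SInv s) :
    SInv (pvABody N i s x y) ∧
      ∀ v, v ∈ (pvABody N i s x y).1 ↔ v ∈ s.1 ∨ v = pvRepunit N i.toNat ∨ pvOpsP x y v := by
  obtain ⟨h0, m0⟩ := pvSAdd_props s (pvRepunit N i.toNat) h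
  obtain ⟨h1, m1⟩ := pvSAdd_props _ (x + y) h0
  obtain ⟨h2, m2⟩ := pvSAdd_props _ (x - y) h1
  obtain ⟨h3, m3⟩ := pvSAdd_props _ (x * y) h2
  simp only [pvABody]
  by_cases hy : y = 0
  · rw [if_pos hy]
    refine ⟨h3, fun v => ?_⟩
    rw [m3, m2, m1, m0]
    unfold pvOpsP
    constructor
    · rintro ((((hv | rfl) | rfl) | rfl) | rfl) <;> tauto
    · rintro (hv | rfl | (rfl | rfl | rfl | ⟨hny, rfl⟩)) <;> tauto
  · obtain ⟨h4, m4⟩ := pvSAdd_props _ (PySem.Int.floordiv x y) h3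
    rw [if_neg hy]
    refine ⟨h4, fun v => ?_⟩
    rw [m4, m3, m2, m1, m0]
    unfold pvOpsP
    constructor
    · rintro (((((hv | rfl) | rfl) | rfl) | rfl) | rfl) <;> tauto
    · rintro (hv | rfl | (rfl | rfl | rfl | ⟨hny, rfl⟩)) <;> tauto

-- folding a body that only adds elements: invariant and members of the result
theorem foldl_props {β : Type} (body : PvSet → β → PvSet) (Q : β → Int → Prop)
    (hbody : ∀ s b, SInv s → SInv (body s b) ∧ ∀ v, v ∈ (body s b).1 ↔ v ∈ s.1 ∨ Q b v) :
    ∀ (l : List β) (init : PvSet), SInv init →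
      SInv (l.foldl body init) ∧
        ∀ v, v ∈ (l.foldl body init).1 ↔ v ∈ init.1 ∨ ∃ b ∈ l, Q b v := by
  intro l
  induction l with
  | nil => intro init h; exact ⟨h, fun v => by simp⟩
  | cons b rest ih =>
    intro init h
    obtain ⟨h1, m1⟩ := hbody init b h
    obtain ⟨h2, m2⟩ := ih (body init b) h1
    refine ⟨h2, fun v => ?_⟩
    simp only [List.foldl_cons]
    rw [m2 v, m1 v]
    constructor
    · rintro ((hv | hq) | ⟨b', hb', hq⟩)
      · exact Or.inl hv
      · exact Or.inr ⟨b, List.mem_cons_self, hq⟩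
      · exact Or.inr ⟨b', List.mem_cons_of_mem _ hb', hq⟩
    · rintro (hv | ⟨b', hb', hq⟩)
      · exact Or.inl (Or.inl hv)
      · rcases List.mem_cons.mp hb' with rfl | hb'
        · exact Or.inl (Or.inr hq)
        · exact Or.inr ⟨b', hb', hq⟩

theorem pvAInner_props (N : Int) (i : Int) (first second di : PvSet) (h : SInv di) :
    SInv (pvAInner N i first second di) ∧
      ∀ v, v ∈ (pvAInner N i first second di).1 ↔
        v ∈ di.1 ∨ ∃ x ∈ first.1, ∃ y ∈ second.1, (v = pvRepunit N i.toNat ∨ pvOpsP x y v) := by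
  unfold pvAInner
  exact foldl_props _ (fun x v => ∃ y ∈ second.1, (v = pvRepunit N i.toNat ∨ pvOpsP x y v))
    (fun s x hs => by
      obtain ⟨hf, mf⟩ := foldl_props (fun di y => pvABody N i di x y)
        (fun y v => v = pvRepunit N i.toNat ∨ pvOpsP x y v)
        (fun s' y hs' => pvABody_props N i s' x y hs') second.1 s hs
      exact ⟨hf, mf⟩) first.1 di h

-- proof-side un-memoized companion of pvReach: what reachable(k) evaluates to
def pvReachSpec (N : Int) (k : Nat) : PvSet :=
  if k ≤ 1 then pvSAdd pvSNew N
  else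
    (PySem.List.pyRange 1 (k : Int) 1).attach.foldl
      (fun vals j =>
        (pvReachSpec N j.1.toNat).1.foldl (fun vals x =>
          (pvReachSpec N (k - j.1.toNat)).1.foldl (fun vals y => pvBOps vals x y) vals) vals)
      (pvSAdd pvSNew (pvRepunit N k))
  termination_by k
  decreasing_by
  · have h := PySem.List.mem_pyRange_one.mp j.2; omega
  · have h := PySem.List.mem_pyRange_one.mp j.2; omega

theorem mem_pvSAdd_pvSNew (z v : Int) : v ∈ (pvSAdd pvSNew z).1 ↔ v = z := by
  rw [(pvSAdd_props pvSNew z sinv_pvSNew).2 v]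
  simp [pvSNew]

theorem pvReachSpec_step_props (N : Int) (k : Nat) :
    SInv ((PySem.List.pyRange 1 (k : Int) 1).attach.foldl
      (fun vals j =>
        (pvReachSpec N j.1.toNat).1.foldl (fun vals x =>
          (pvReachSpec N (k - j.1.toNat)).1.foldl (fun vals y => pvBOps vals x y) vals) vals)
      (pvSAdd pvSNew (pvRepunit N k))) ∧
    ∀ v, v ∈ ((PySem.List.pyRange 1 (k : Int) 1).attach.foldl
      (fun vals j =>
        (pvReachSpec N j.1.toNat).1.foldl (fun vals x =>
          (pvReachSpec N (k - j.1.toNat)).1.foldl (fun vals y => pvBOps vals x y) vals) vals)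
      (pvSAdd pvSNew (pvRepunit N k))).1 ↔
      v ∈ (pvSAdd pvSNew (pvRepunit N k)).1 ∨
        ∃ j ∈ (PySem.List.pyRange 1 (k : Int) 1).attach,
          ∃ x ∈ (pvReachSpec N j.1.toNat).1, ∃ y ∈ (pvReachSpec N (k - j.1.toNat)).1,
            pvOpsP x y v := by
  exact foldl_props _
    (fun j v => ∃ x ∈ (pvReachSpec N j.1.toNat).1,
      ∃ y ∈ (pvReachSpec N (k - j.1.toNat)).1, pvOpsP x y v)
    (fun s j hs => by
      exact foldl_props _
        (fun x v => ∃ y ∈ (pvReachSpec N (k - j.1.toNat)).1, pvOpsP x y v)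
        (fun s' x hs' => foldl_props _ (fun y v => pvOpsP x y v)
          (fun s'' y hs'' => pvBOps_props s'' x y hs'') _ s' hs')
        (pvReachSpec N j.1.toNat).1 s hs)
    (PySem.List.pyRange 1 (k : Int) 1).attach (pvSAdd pvSNew (pvRepunit N k))
    (pvSAdd_props pvSNew (pvRepunit N k) sinv_pvSNew).1

theorem sinv_pvReachSpec (N : Int) (k : Nat) : SInv (pvReachSpec N k) := by
  rw [pvReachSpec]
  by_cases hk : k ≤ 1
  · rw [if_pos hk]; exact (pvSAdd_props pvSNew N sinv_pvSNew).1
  · rw [if_neg hk]; exact (pvReachSpec_step_props N k).1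

-- membership characterisation of B's reachable(k), k ≥ 2
theorem mem_pvReachSpec (N : Int) (k : Nat) (hk : 2 ≤ k) (v : Int) :
    v ∈ (pvReachSpec N k).1 ↔
      v = pvRepunit N k ∨
        ∃ j : Nat, 1 ≤ j ∧ j < k ∧
          ∃ x ∈ (pvReachSpec N j).1, ∃ y ∈ (pvReachSpec N (k - j)).1, pvOpsP x y v := by
  rw [pvReachSpec, if_neg (by omega)]
  rw [(pvReachSpec_step_props N k).2 v, mem_pvSAdd_pvSNew]
  constructor
  · rintro (h | ⟨⟨j, hj⟩, _, h⟩)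
    · exact Or.inl h
    · right
      have hb := PySem.List.mem_pyRange_one.mp hj
      exact ⟨j.toNat, by omega, by omega, by simpa using h⟩
  · rintro (h | ⟨j, hj1, hj2, h⟩)
    · exact Or.inl h
    · right
      refine ⟨⟨(j : Int), PySem.List.mem_pyRange_one.mpr (by omega)⟩, List.mem_attach _ _, ?_⟩
      simpa using h

theorem mem_pvReachSpec_one (N v : Int) : v ∈ (pvReachSpec N 1).1 ↔ v = N := by
  rw [pvReachSpec, if_pos (by omega)]
  exact mem_pvSAdd_pvSNew N v

theorem pvReachSpec_nonempty (N : Int) (k : Nat) : ∃ v, v ∈ (pvReachSpec N k).1 := by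
  by_cases hk : k ≤ 1
  · refine ⟨N, ?_⟩
    rw [pvReachSpec, if_pos hk]
    exact (mem_pvSAdd_pvSNew N N).mpr rfl
  · exact ⟨pvRepunit N k, (mem_pvReachSpec N k (by omega) _).mpr (Or.inl rfl)⟩

-- the memo dict holds, for Nat keys only, exactly already-computed reachable-sets, and key 1
def MemoOK (N : Int) (memo : PySem.Dict Int PvSet) : Prop :=
  memo.get? 1 = some (pvSAdd pvSNew N) ∧
  ∀ m s, memo.get? m = some s → ∃ km : Nat, m = (km : Int) ∧ s = pvReachSpec N km

theorem pvReachSpec_one_eq (N : Int) : pvReachSpec N 1 = pvSAdd pvSNew N := by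
  rw [pvReachSpec]; rfl

theorem pvReach_eq (N : Int) : ∀ k : Nat, 1 ≤ k → ∀ memo, MemoOK N memo →
    (pvReach N k memo).1 = pvReachSpec N k ∧ MemoOK N (pvReach N k memo).2 := by
  intro k
  induction k using Nat.strong_induction_on with
  | _ k IH =>
    intro hk memo hm
    rw [pvReach]
    cases hget : memo.get? (k : Int) with
    | some s =>
      obtain ⟨km, hkm, hs⟩ := hm.2 _ _ hget
      have hkk : km = k := by exact_mod_cast hkm.symm
      subst hkk
      simpa using ⟨hs ▸ rfl, hm⟩
    | none =>
      have hk2 : 2 ≤ k := by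
        rcases Nat.lt_or_ge k 2 with h | h
        · exfalso
          have hk1 : k = 1 := by omega
          rw [hk1] at hget
          have h1 : ((1 : Nat) : Int) = (1 : Int) := by norm_num
          rw [h1, hm.1] at hget
          simp at hget
        · exact h
      have hfold : ∀ (js : List {x // x ∈ PySem.List.pyRange 1 (k : Int) 1})
          (vals : PvSet) (memo' : PySem.Dict Int PvSet), MemoOK N memo' →
          (js.foldl
            (fun st j =>
              let fr := pvReach N j.1.toNat st.2
              let se := pvReach N (k - j.1.toNat) fr.2
              ((fr.1.1.foldl (fun vals x =>
                  se.1.1.foldl (fun vals y => pvBOps vals x y) vals) st.1, se.2) :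
                PvSet × PySem.Dict Int PvSet))
            (vals, memo')).1 =
            js.foldl
              (fun vals j =>
                (pvReachSpec N j.1.toNat).1.foldl (fun vals x =>
                  (pvReachSpec N (k - j.1.toNat)).1.foldl (fun vals y => pvBOps vals x y) vals) vals)
              vals ∧
          MemoOK N (js.foldl
            (fun st j =>
              let fr := pvReach N j.1.toNat st.2
              let se := pvReach N (k - j.1.toNat) fr.2
              ((fr.1.1.foldl (fun vals x =>
                  se.1.1.foldl (fun vals y => pvBOps vals x y) vals) st.1, se.2) :
                PvSet × PySem.Dict Int PvSet))
            (vals, memo')).2 := by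
        intro js
        induction js with
        | nil => intro vals memo' hm'; exact ⟨rfl, hm'⟩
        | cons j rest ihj =>
          intro vals memo' hm'
          have hb := PySem.List.mem_pyRange_one.mp j.2
          obtain ⟨e1, m1⟩ := IH j.1.toNat (by omega) (by omega) memo' hm'
          obtain ⟨e2, m2⟩ := IH (k - j.1.toNat) (by omega) (by omega) (pvReach N j.1.toNat memo').2 m1
          simp only [List.foldl_cons]
          have hv : (pvReach N j.1.toNat memo').1.1.foldl
              (fun vals x =>
                (pvReach N (k - j.1.toNat) (pvReach N j.1.toNat memo').2).1.1.foldl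
                  (fun vals y => pvBOps vals x y) vals) vals =
              (pvReachSpec N j.1.toNat).1.foldl
                (fun vals x =>
                  (pvReachSpec N (k - j.1.toNat)).1.foldl
                    (fun vals y => pvBOps vals x y) vals) vals := by
            rw [e1, e2]
          obtain ⟨r1, r2⟩ := ihj ((pvReach N j.1.toNat memo').1.1.foldl
              (fun vals x =>
                (pvReach N (k - j.1.toNat) (pvReach N j.1.toNat memo').2).1.1.foldl
                  (fun vals y => pvBOps vals x y) vals) vals)
            (pvReach N (k - j.1.toNat) (pvReach N j.1.toNat memo').2).2 m2
          exact ⟨r1.trans (by rw [hv]), r2⟩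
      obtain ⟨r1, r2⟩ := hfold (PySem.List.pyRange 1 (k : Int) 1).attach
        (pvSAdd pvSNew (pvRepunit N k)) memo hm
      constructor
      · rw [pvReachSpec, if_neg (by omega)]
        exact r1
      · refine ⟨?_, ?_⟩
        · rw [PySem.Dict.get?_insert_of_ne _ _
            (show (1 : Int) ≠ (k : Int) by exact_mod_cast (by omega : ¬ (1 : Int) = (k : Int)))]
          exact r2.1
        · intro m s hms
          rw [PySem.Dict.get?_insert] at hms
          by_cases hmk : m = (k : Int)
          · rw [if_pos hmk] at hms
            refine ⟨k, hmk, ?_⟩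
            cases hms
            rw [pvReachSpec, if_neg (by omega)]
            exact r1
          · rw [if_neg hmk] at hms
            exact r2.2 m s hms

-- the dp-array invariant at the start of outer iteration i
def pvInv (N : Int) (i : Int) (dp : List PvSet) : Prop :=
  dp.length = 9 ∧
    ∀ m : Int, 0 ≤ m → m < 9 →
      SInv (PySem.List.pyGetD dp m pvSNew) ∧
      ∀ v, v ∈ (PySem.List.pyGetD dp m pvSNew).1 ↔
        (1 ≤ m ∧ m < i ∧ v ∈ (pvReachSpec N m.toNat).1)

-- pyGetD after pySetD, Int indices (wrapper over PySem.List.pyGetD_pySetD_natCast)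
theorem pvGetSet (xs : List PvSet) (i m : Int) (h0 : 0 ≤ i)
    (h : i < (xs.length : Int)) (hm : 0 ≤ m) (v : PvSet) :
    PySem.List.pyGetD (PySem.List.pySetD xs i v) m pvSNew =
      if m = i then v else PySem.List.pyGetD xs m pvSNew := by
  have hi : i = ((i.toNat : Nat) : Int) := by omega
  have hm' : m = ((m.toNat : Nat) : Int) := by omega
  rw [hi, hm', PySem.List.pyGetD_pySetD_natCast xs i.toNat m.toNat v pvSNew (by omega)]
  by_cases hcase : m = i
  · rw [if_pos (by omega), if_pos (by omega)]
  · rw [if_neg (by omega), if_neg (by omega)]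

-- one full j-loop: effect on the members of the dp array
theorem jloop_members (N : Int) (i : Int) (hi0 : 0 ≤ i) (hi9 : i < 9) :
    ∀ (js : List Int), (∀ j ∈ js, 1 ≤ j ∧ j < i) →
      ∀ (dp : List PvSet), dp.length = 9 → SInv (PySem.List.pyGetD dp i pvSNew) →
        (js.foldl (pvAStepJ N i) dp).length = 9 ∧
        (∀ m : Int, 0 ≤ m → m ≠ i →
          PySem.List.pyGetD (js.foldl (pvAStepJ N i) dp) m pvSNew =
            PySem.List.pyGetD dp m pvSNew) ∧
        SInv (PySem.List.pyGetD (js.foldl (pvAStepJ N i) dp) i pvSNew) ∧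
        (∀ v, v ∈ (PySem.List.pyGetD (js.foldl (pvAStepJ N i) dp) i pvSNew).1 ↔
          v ∈ (PySem.List.pyGetD dp i pvSNew).1 ∨
            ∃ j ∈ js, ∃ x ∈ (PySem.List.pyGetD dp j pvSNew).1,
              ∃ y ∈ (PySem.List.pyGetD dp (i - j) pvSNew).1,
                (v = pvRepunit N i.toNat ∨ pvOpsP x y v)) := by
  intro js
  induction js with
  | nil => intro _ dp hlen hsi; exact ⟨hlen, fun _ _ _ => rfl, hsi, fun v => by simp⟩
  | cons j rest ih =>
    intro hjs dp hlen hsi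
    have hj : 1 ≤ j ∧ j < i := hjs j (List.mem_cons_self)
    have hget₁ : ∀ m : Int, 0 ≤ m →
        PySem.List.pyGetD (pvAStepJ N i dp j) m pvSNew =
          if m = i then
            pvAInner N i (PySem.List.pyGetD dp j pvSNew)
              (PySem.List.pyGetD dp (i - j) pvSNew)
              (PySem.List.pyGetD dp i pvSNew)
          else PySem.List.pyGetD dp m pvSNew := by
      intro m hm
      simp only [pvAStepJ]
      exact pvGetSet dp i m hi0 (by omega) hm _
    have hlen₁ : (pvAStepJ N i dp j).length = 9 := by
      simp only [pvAStepJ]; rw [PySem.List.length_pySetD]; exact hlen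
    obtain ⟨hin, min⟩ := pvAInner_props N i (PySem.List.pyGetD dp j pvSNew)
      (PySem.List.pyGetD dp (i - j) pvSNew) (PySem.List.pyGetD dp i pvSNew) hsi
    have hsi₁ : SInv (PySem.List.pyGetD (pvAStepJ N i dp j) i pvSNew) := by
      rw [hget₁ i hi0, if_pos rfl]; exact hin
    obtain ⟨L, Hne, HS, Hi⟩ := ih (fun j' hj' => hjs j' (List.mem_cons_of_mem _ hj'))
      (pvAStepJ N i dp j) hlen₁ hsi₁
    simp only [List.foldl_cons]
    refine ⟨L, ?_, HS, ?_⟩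
    · intro m hm0 hmne
      rw [Hne m hm0 hmne, hget₁ m hm0, if_neg hmne]
    · intro v
      have hrestget : ∀ j' : Int, 1 ≤ j' → j' < i →
          PySem.List.pyGetD (pvAStepJ N i dp j) j' pvSNew =
            PySem.List.pyGetD dp j' pvSNew ∧
          PySem.List.pyGetD (pvAStepJ N i dp j) (i - j') pvSNew =
            PySem.List.pyGetD dp (i - j') pvSNew := by
        intro j' h1 h2
        constructor
        · rw [hget₁ j' (by omega), if_neg (by omega)]
        · rw [hget₁ (i - j') (by omega), if_neg (by omega)]
      rw [Hi v, hget₁ i hi0, if_pos rfl, min v]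
      constructor
      · rintro ((h | ⟨x, hx, y, hy, hc⟩) | ⟨j', hj', x, hx, y, hy, hc⟩)
        · exact Or.inl h
        · exact Or.inr ⟨j, List.mem_cons_self, x, hx, y, hy, hc⟩
        · have hb := hjs j' (List.mem_cons_of_mem _ hj')
          obtain ⟨e1, e2⟩ := hrestget j' hb.1 hb.2
          rw [e1] at hx; rw [e2] at hy
          exact Or.inr ⟨j', List.mem_cons_of_mem _ hj', x, hx, y, hy, hc⟩
      · rintro (h | ⟨j', hj', x, hx, y, hy, hc⟩)
        · exact Or.inl (Or.inl h)
        · rcases List.mem_cons.mp hj' with rfl | hj'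
          · exact Or.inl (Or.inr ⟨x, hx, y, hy, hc⟩)
          · have hb := hjs j' (List.mem_cons_of_mem _ hj')
            obtain ⟨e1, e2⟩ := hrestget j' hb.1 hb.2
            rw [← e1] at hx; rw [← e2] at hy
            exact Or.inr ⟨j', hj', x, hx, y, hy, hc⟩

theorem loop_eq (N number : Int) :
    ∀ (n : Nat) (i : Int), 2 ≤ i → i + n = 9 →
      ∀ dp memo, pvInv N i dp → MemoOK N memo →
        pvALoop N number dp (PySem.List.pyRange i 9 1) =
          pvBLoop N number memo (PySem.List.pyRange i 9 1) := by
  intro n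
  induction n with
  | zero =>
    intro i h2 h9 dp memo _ _
    rw [PySem.List.pyRange_one_eq_nil (by omega)]
    rfl
  | succ n ih =>
    intro i h2 h9 dp memo hinv hmemo
    obtain ⟨hr1, hr2⟩ := pvReach_eq N i.toNat (by omega) memo hmemo
    obtain ⟨hlen, hmem⟩ := hinv
    rw [PySem.List.pyRange_one_cons (by omega : i < 9)]
    have hjs : ∀ j ∈ PySem.List.pyRange 1 i 1, 1 ≤ j ∧ j < i := by
      intro j hj; exact PySem.List.mem_pyRange_one.mp hj
    obtain ⟨hlen', hne', hS', hi'⟩ := jloop_members N i (by omega) (by omega) _ hjs dp hlen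
      (hmem i (by omega) (by omega)).1
    have hreach : ∀ v, v ∈ (PySem.List.pyGetD
        ((PySem.List.pyRange 1 i 1).foldl (pvAStepJ N i) dp) i pvSNew).1 ↔
        v ∈ (pvReachSpec N i.toNat).1 := by
      intro v
      rw [hi' v, mem_pvReachSpec N i.toNat (by omega)]
      constructor
      · rintro (h | ⟨j, hjm, x, hx, y, hy, hc⟩)
        · exact absurd ((hmem i (by omega) (by omega)).2 v |>.mp h) (by omega)
        · have hb := PySem.List.mem_pyRange_one.mp hjm
          have hxr := (((hmem j (by omega) (by omega)).2 x).mp hx).2.2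
          have hyr := (((hmem (i - j) (by omega) (by omega)).2 y).mp hy).2.2
          rcases hc with rfl | hc
          · exact Or.inl rfl
          · refine Or.inr ⟨j.toNat, by omega, by omega, x, hxr, y, ?_, hc⟩
            have he : (i - j).toNat = i.toNat - j.toNat := by omega
            rwa [he] at hyr
      · rintro (rfl | ⟨jn, h1, h2n, x, hx, y, hy, hc⟩)
        · obtain ⟨y, hy⟩ := pvReachSpec_nonempty N ((i - 1).toNat)
          refine Or.inr ⟨1, PySem.List.mem_pyRange_one.mpr (by omega), N, ?_, y, ?_, Or.inl rfl⟩
          · refine ((hmem 1 (by omega) (by omega)).2 N).mpr ⟨by omega, by omega, ?_⟩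
            rw [(by omega : (1 : Int).toNat = 1)]
            exact (mem_pvReachSpec_one N N).mpr rfl
          · exact ((hmem (i - 1) (by omega) (by omega)).2 y).mpr ⟨by omega, by omega, hy⟩
        · refine Or.inr ⟨(jn : Int), PySem.List.mem_pyRange_one.mpr (by omega), x, ?_, y, ?_, Or.inr hc⟩
          · refine ((hmem (jn : Int) (by omega) (by omega)).2 x).mpr ⟨by omega, by omega, ?_⟩
            rwa [(by omega : ((jn : Int)).toNat = jn)]
          · refine ((hmem (i - (jn : Int)) (by omega) (by omega)).2 y).mpr ⟨by omega, by omega, ?_⟩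
            rwa [(by omega : (i - (jn : Int)).toNat = i.toNat - jn)]
    have hcont : pvSIn number (PySem.List.pyGetD
        ((PySem.List.pyRange 1 i 1).foldl (pvAStepJ N i) dp) i pvSNew) =
        pvSIn number (pvReach N i.toNat memo).1 := by
      rw [hr1]
      unfold pvSIn
      rw [Bool.eq_iff_iff, hS' number, (sinv_pvReachSpec N i.toNat) number]
      exact hreach number
    simp only [pvALoop, pvBLoop]
    rw [hcont]
    by_cases hc : pvSIn number (pvReach N i.toNat memo).1 = true
    · rw [if_pos hc, if_pos hc]
    · rw [if_neg hc, if_neg hc]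
      apply ih (i + 1) (by omega) (by omega) _ (pvReach N i.toNat memo).2 _ hr2
      refine ⟨hlen', ?_⟩
      intro m hm0 hm9
      by_cases hmi : m = i
      · subst hmi
        refine ⟨hS', fun v => ?_⟩
        rw [hreach v]
        constructor
        · intro h; exact ⟨by omega, by omega, h⟩
        · rintro ⟨_, _, h⟩; exact h
      · rw [hne' m hm0 hmi]
        obtain ⟨hs0, hm0'⟩ := hmem m hm0 hm9
        refine ⟨hs0, fun v => ?_⟩
        rw [hm0' v]
        constructor
        · rintro ⟨a, b, c⟩; exact ⟨a, by omega, c⟩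
        · rintro ⟨a, b, c⟩; exact ⟨a, by omega, c⟩

-- ===== VERDICT (by name: the statement is the Claim_ definition above) =====
theorem solution_spec : Claim_equal_solution := by
  intro N number _ _
  unfold Spec_solution
  by_cases h : N = number
  · simp [solution, solution_alt, h]
  · have hA : solution N number =
        pvALoop N number
          ([pvSNew, pvSAdd pvSNew N, pvSNew, pvSNew, pvSNew, pvSNew, pvSNew, pvSNew, pvSNew])
          (PySem.List.pyRange 2 9 1) := by
      rw [solution, if_neg h]; rfl
    have hB : solution_alt N number =
        pvBLoop N number (PySem.Dict.ofList [((1 : Int), pvSAdd pvSNew N)])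
          (PySem.List.pyRange 2 9 1) := by
      rw [solution_alt, if_neg h]
    rw [hA, hB]
    refine loop_eq N number 7 2 (by omega) (by omega) _ _ ?_ ?_
    · refine ⟨rfl, ?_⟩
      intro m hm0 hm9
      by_cases hm1 : m = 1
      · subst hm1
        have e : PySem.List.pyGetD
            [pvSNew, pvSAdd pvSNew N, pvSNew, pvSNew, pvSNew, pvSNew, pvSNew, pvSNew, pvSNew]
            1 pvSNew = pvSAdd pvSNew N := rfl
        rw [e]
        refine ⟨(pvSAdd_props pvSNew N sinv_pvSNew).1, fun v => ?_⟩
        rw [mem_pvSAdd_pvSNew, (rfl : (1 : Int).toNat = 1)]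
        constructor
        · intro hv
          exact ⟨by omega, by omega, (mem_pvReachSpec_one N v).mpr hv⟩
        · rintro ⟨_, _, hv⟩
          exact (mem_pvReachSpec_one N v).mp hv
      · rcases (by omega :
            m = 0 ∨ m = 2 ∨ m = 3 ∨ m = 4 ∨ m = 5 ∨ m = 6 ∨ m = 7 ∨ m = 8) with
          rfl | rfl | rfl | rfl | rfl | rfl | rfl | rfl
        all_goals
          refine ⟨?_, fun v => ?_⟩ <;>
            rw [(rfl : PySem.List.pyGetD
              [pvSNew, pvSAdd pvSNew N, pvSNew, pvSNew, pvSNew, pvSNew, pvSNew, pvSNew, pvSNew]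
              _ pvSNew = pvSNew)]
        all_goals first
          | exact sinv_pvSNew
          | simp [pvSNew]
    · have hD : PySem.Dict.ofList [((1 : Int), pvSAdd pvSNew N)] =
          PySem.Dict.mk [((1 : Int), pvSAdd pvSNew N)] := rfl
      constructor
      · rfl
      · intro m s hms
        rw [hD, PySem.Dict.get?_mk_cons] at hms
        by_cases hm1 : (1 : Int) == m
        · rw [if_pos hm1] at hms
          refine ⟨1, by simpa using (eq_of_beq hm1).symm, ?_⟩
          rw [pvReachSpec_one_eq]
          exact (Option.some.inj hms).symm
        · rw [if_neg hm1] at hms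
          exact absurd hms (by simp [PySem.Dict.get?])
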